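-- pv_equiv track=rewrite | github.com/riffschelder/train.usaco.org | chapter1/section1.4/wormhole.py | map_rights
-- ===== SOURCE A (Python) =====
-- def get_col(i_col):
--   """
--   gets (i, col)
--   returns col
--   probably could have used an itemgetter instead
--   """
--   return i_col[1]
--
-- def map_rights(coords):
--   """
--   who's to the right of whom?
--   - right_neighbor_of[i] == j, if we walk from wormhole #i to the right and land in wormhold #j.
--   - right_neighbor_of[i] is None, if wormhole #i is the rightmost wormhole in that row.
--   """
--   right_neighbor_of = [None] * len(coords)
--
--   wormholes_by_row = {}  # who needs defaultdict when we can write it by hand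
--   for i, coord in enumerate(coords):
--     row = coord[0]
--     col = coord[1]
--     if row not in wormholes_by_row:
--       wormholes_by_row[row] = [(i, col)]
--     else:
--       wormholes_by_row[row].append((i, col))
--
--   for row, wormholes in wormholes_by_row.items():
--     wormholes.sort(key=get_col)
--     last_wormhole = None
--     for i, col in wormholes:
--       if last_wormhole is not None:
--         right_neighbor_of[last_wormhole[0]] = i
--       last_wormhole = (i, col)
--     # right neightbor of last_wormhole when we exit the loop is already None (as it should be).
--
--   return right_neighbor_of
-- ===== SOURCE B (Python) =====
-- def map_rights(coords):
--   """For each wormhole pick, by direct scan, the same-row wormhole whose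
--   (col, index) pair is the least one strictly greater than its own."""
--   res = []
--   for i, (r, c) in enumerate(coords):
--     best = None
--     for j, (r2, c2) in enumerate(coords):
--       if r2 == r and (c, i) < (c2, j) and (best is None or (c2, j) < best):
--         best = (c2, j)
--     res.append(None if best is None else best[1])
--   return res
-- ===== Notes on version B (the rewrite author's own statement) =====
-- stated objective: alternative
-- what changed: Replaces A's dict-of-rows grouping, per-row stable sort and neighbor-linking walk by a direct nested scan that, for each wormhole, picks the same-row wormhole with the least (col, index) pair strictly greater than its own.
import Mathlib
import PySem

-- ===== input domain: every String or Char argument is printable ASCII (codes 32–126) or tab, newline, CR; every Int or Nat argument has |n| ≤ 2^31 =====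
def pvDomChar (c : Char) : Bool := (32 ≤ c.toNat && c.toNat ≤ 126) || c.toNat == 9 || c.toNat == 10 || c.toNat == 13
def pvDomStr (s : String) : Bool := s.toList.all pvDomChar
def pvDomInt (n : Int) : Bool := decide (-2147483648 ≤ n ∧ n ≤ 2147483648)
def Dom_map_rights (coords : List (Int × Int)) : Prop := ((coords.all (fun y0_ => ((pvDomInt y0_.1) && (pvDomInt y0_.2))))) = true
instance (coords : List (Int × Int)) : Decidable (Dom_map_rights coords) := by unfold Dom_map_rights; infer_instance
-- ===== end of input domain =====

-- B replaces A's dict-of-rows grouping + per-row stable sort + neighbor linking by a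
-- direct per-wormhole scan for the lexicographically least strictly greater (col, index)
-- pair in the same row (objective: alternative, not faster).

-- ===== PORT A =====
def get_col (i_col : Int × Int) : Int := i_col.2

-- the grouping loop body: 'if row not in d: d[row] = [(i, col)] else: d[row].append((i, col))'
-- (the in-place .append is modeled by re-inserting the extended list; insert keeps the key's position)
def pvGroupStep (d : PySem.Dict Int (List (Int × Int))) (p : Int × (Int × Int)) :
    PySem.Dict Int (List (Int × Int)) :=
  if ¬ (d.contains p.2.1 = true) then d.insert p.2.1 [(p.1, p.2.2)]
  else d.insert p.2.1 ((d.getD p.2.1 []) ++ [(p.1, p.2.2)])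

-- the linking loop body: 'if last_wormhole is not None: right[last[0]] = i; last = (i, col)'
def pvLinkStep (st : List (Option Int) × Option (Int × Int)) (ic : Int × Int) :
    List (Option Int) × Option (Int × Int) :=
  match st.2 with
  | some lw => (PySem.List.pySetD st.1 lw.1 (some ic.1), some ic)
  | none => (st.1, some ic)

-- one iteration of 'for row, wormholes in wormholes_by_row.items()'
def pvRowStep (right : List (Option Int)) (rw : Int × List (Int × Int)) : List (Option Int) :=
  ((PySem.List.sorted rw.2 get_col).foldl pvLinkStep (right, none)).1

def map_rights (coords : List (Int × Int)) : List (Option Int) :=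
  let right0 : List (Option Int) := List.replicate coords.length none
  let d : PySem.Dict Int (List (Int × Int)) :=
    (PySem.List.enumerate coords 0).foldl pvGroupStep PySem.Dict.empty
  d.items.foldl pvRowStep right0

-- ===== PORT B =====
-- Python tuple comparison '(a, b) < (c, d)' on int pairs
def pvLexLt (a b : Int × Int) : Bool := a.1 < b.1 || (a.1 == b.1 && a.2 < b.2)

-- inner-loop body of B: keep the least (c2, j) candidate seen so far
def pvBestStep (p : Int × (Int × Int)) (best : Option (Int × Int)) (q : Int × (Int × Int)) :
    Option (Int × Int) :=
  if q.2.1 == p.2.1 && pvLexLt (p.2.2, p.1) (q.2.2, q.1)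
      && (match best with | none => true | some b => pvLexLt (q.2.2, q.1) b)
  then some (q.2.2, q.1) else best

def map_rights_alt (coords : List (Int × Int)) : List (Option Int) :=
  let e := PySem.List.enumerate coords 0
  e.foldl (fun res p =>
    res ++ [match e.foldl (pvBestStep p) none with | none => none | some b => some b.2]) []

-- ===== PRECONDITION & SPEC =====
def Spec_map_rights (coords : List (Int × Int)) (out : List (Option Int)) : Prop := out = map_rights_alt coords
instance (coords : List (Int × Int)) (out : List (Option Int)) : Decidable (Spec_map_rights coords out) := by unfold Spec_map_rights; infer_instance

-- ===== CLAIM (what is proved, stated in full; the proofs are below) =====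
def Claim_equal_map_rights : Prop := ∀ (coords : List (Int × Int)), Dom_map_rights coords → Spec_map_rights coords (map_rights coords)

-- ===== LEMMAS AND PROOFS =====

-- the (index, col) pairs of the wormholes of row r, in index order
def rowPairs (coords : List (Int × Int)) (r : Int) : List (Int × Int) :=
  ((PySem.List.enumerate coords 0).filter (fun p => p.2.1 == r)).map (fun p => (p.1, p.2.2))

-- value written at index k by the linking loop (successor of k in the walked list)
def succF : Option (Int × Int) → List (Int × Int) → Int → Option Int
  | _, [], _ => none
  | none, q :: ws, k => succF (some q) ws k
  | some lw, q :: ws, k => if lw.1 = k then some q.1 else succF (some q) ws k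

-- strict lexicographic order on (col, index) of an (index, col) pair
def lexP (a b : Int × Int) : Prop := a.2 < b.2 ∨ (a.2 = b.2 ∧ a.1 < b.1)

lemma pvLexLt_iff (a b : Int × Int) : pvLexLt a b = true ↔ (a.1 < b.1 ∨ (a.1 = b.1 ∧ a.2 < b.2)) := by
  simp [pvLexLt]

-- ---- grouping phase ----

lemma dedup_append_singleton (xs : List Int) (x : Int) :
    PySem.List.dedup (xs ++ [x]) =
      if x ∈ PySem.List.dedup xs then PySem.List.dedup xs else PySem.List.dedup xs ++ [x] := by
  simp only [PySem.List.dedup_eq_ofList, PySem.Set.ofList_eq_foldl, List.foldl_append,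
    List.foldl_cons, List.foldl_nil]
  show PySem.Set.add _ x = _
  simp only [PySem.Set.add, PySem.Set.contains]
  by_cases h : x ∈ List.foldl PySem.Set.add [] xs
  · rw [if_pos (List.contains_iff_mem.mpr h), if_pos h]
  · rw [if_neg (fun hc => h (List.contains_iff_mem.mp hc)), if_neg h]

lemma find?_map_keys (rows : List Int) (f : Int → List (Int × Int)) (r : Int) (h : r ∈ rows) :
    List.find? (fun p => p.1 == r) (rows.map (fun r' => (r', f r'))) = some (r, f r) := by
  induction rows with
  | nil => simp at h
  | cons a t ih =>
    rw [List.map_cons]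
    by_cases ha : a = r
    · subst ha; rw [List.find?_cons_of_pos (by simp)]
    · rw [List.find?_cons_of_neg (by simp [ha])]
      exact ih ((List.mem_cons.mp h).resolve_left (fun he => ha he.symm))

lemma rowPairs_append (cs : List (Int × Int)) (c : Int × Int) (r : Int) :
    rowPairs (cs ++ [c]) r = rowPairs cs r ++
      (if c.1 = r then [((cs.length : Int), c.2)] else []) := by
  unfold rowPairs
  rw [PySem.List.enumerate_append, List.filter_append, List.map_append]
  congr 1
  by_cases hc : c.1 = r
  · simp [PySem.List.enumerate, hc]
  · simp [PySem.List.enumerate, hc]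

lemma rowPairs_nil_of_not_mem (cs : List (Int × Int)) (r : Int) (h : r ∉ cs.map Prod.fst) :
    rowPairs cs r = [] := by
  unfold rowPairs
  rw [List.map_eq_nil_iff, List.filter_eq_nil_iff]
  intro p hp
  rcases (PySem.List.mem_enumerate_iff ..).mp hp with ⟨m, hm, rfl⟩
  simp only [beq_iff_eq]
  intro he
  exact h (List.mem_map.mpr ⟨cs[m], List.getElem_mem _, he⟩)

lemma groupStep_items (coords : List (Int × Int)) :
    ((PySem.List.enumerate coords 0).foldl pvGroupStep PySem.Dict.empty).items
      = (PySem.List.dedup (coords.map Prod.fst)).map (fun r => (r, rowPairs coords r)) := by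
  induction coords using List.reverseRecOn with
  | nil => rfl
  | append_singleton cs c ih =>
    rw [PySem.List.enumerate_append, List.foldl_append,
      show PySem.List.enumerate [c] (0 + (cs.length : Int)) = [((cs.length : Int), c)] by
        simp [PySem.List.enumerate],
      List.foldl_cons, List.foldl_nil]
    have hkeys := ih
    have hcont : (((PySem.List.enumerate cs 0).foldl pvGroupStep PySem.Dict.empty).contains c.1
        = true) ↔ c.1 ∈ PySem.List.dedup (cs.map Prod.fst) := by
      show (List.any ((PySem.List.enumerate cs 0).foldl pvGroupStep PySem.Dict.empty).items
        (fun p => p.1 == c.1)) = true ↔ _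
      rw [hkeys]
      simp [List.any_map, Function.comp_def]
    rw [List.map_append, List.map_singleton, dedup_append_singleton]
    by_cases hmem : c.1 ∈ PySem.List.dedup (cs.map Prod.fst)
    · rw [if_pos hmem]
      show (if ¬ _ then _ else _ : PySem.Dict Int (List (Int × Int))).items = _
      rw [if_neg (not_not_intro (hcont.mpr hmem))]
      have hget : ((PySem.List.enumerate cs 0).foldl pvGroupStep PySem.Dict.empty).getD c.1 []
          = rowPairs cs c.1 := by
        show (Option.map Prod.snd (List.find? (fun p => p.1 == c.1) _)).getD [] = _
        rw [hkeys, find?_map_keys _ _ _ hmem]; rfl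
      rw [PySem.Dict.items_insert_of_contains _ _ (hcont.mpr hmem), hkeys, List.map_map]
      apply List.map_congr_left
      intro r hr
      simp only [Function.comp_def]
      by_cases hrc : r = c.1
      · subst hrc
        rw [if_pos (by simp), rowPairs_append, if_pos rfl, hget]
      · rw [if_neg (by simp [hrc]), rowPairs_append, if_neg (fun h => hrc h.symm),
          List.append_nil]
    · rw [if_neg hmem]
      show (if ¬ _ then _ else _ : PySem.Dict Int (List (Int × Int))).items = _
      rw [if_pos (fun h => hmem (hcont.mp h))]
      have hcf : ((PySem.List.enumerate cs 0).foldl pvGroupStep PySem.Dict.empty).contains c.1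
          = false := by
        cases h : ((PySem.List.enumerate cs 0).foldl pvGroupStep PySem.Dict.empty).contains c.1
        · rfl
        · exact absurd (hcont.mp h) hmem
      rw [PySem.Dict.items_insert_of_not_contains _ _ hcf, hkeys, List.map_append]
      congr 1
      · apply List.map_congr_left
        intro r hr
        rw [rowPairs_append, if_neg, List.append_nil]
        intro h
        exact hmem (h ▸ hr)
      · rw [List.map_singleton, rowPairs_append, if_pos rfl,
          rowPairs_nil_of_not_mem cs c.1 (fun h => hmem ((PySem.List.mem_dedup ..).mpr h)),
          List.nil_append]

-- ---- linking phase ----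

lemma length_linkFold (ws : List (Int × Int)) (arr : List (Option Int)) (last : Option (Int × Int)) :
    ((ws.foldl pvLinkStep (arr, last)).1).length = arr.length := by
  induction ws generalizing arr last with
  | nil => rfl
  | cons q t ih =>
    cases last with
    | none => simpa [pvLinkStep] using ih arr (some q)
    | some lw =>
      simpa [pvLinkStep, PySem.List.length_pySetD] using
        ih (PySem.List.pySetD arr lw.1 (some q.1)) (some q)

lemma succF_mem {lw : Int × Int} {ws : List (Int × Int)} {k : Int} {j : Int}
    (h : succF (some lw) ws k = some j) : k = lw.1 ∨ k ∈ ws.map Prod.fst := by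
  induction ws generalizing lw with
  | nil => simp [succF] at h
  | cons q t ih =>
    by_cases hq : lw.1 = k
    · exact Or.inl hq.symm
    · simp only [succF, if_neg hq] at h
      rcases ih h with h1 | h2
      · exact Or.inr (by simp [h1])
      · exact Or.inr (by simp [List.mem_map] at h2 ⊢; tauto)

lemma linkFold_get (ws : List (Int × Int)) (arr : List (Option Int)) (last : Option (Int × Int)) (k : Nat)
    (hws : ∀ p ∈ ws, 0 ≤ p.1 ∧ p.1 < (arr.length : Int))
    (hlast : ∀ lw, last = some lw → 0 ≤ lw.1 ∧ lw.1 < (arr.length : Int))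
    (hnd : ((match last with | none => ([] : List Int) | some lw => [lw.1]) ++ ws.map Prod.fst).Nodup) :
    ((ws.foldl pvLinkStep (arr, last)).1)[k]? =
      match succF last ws (k : Int) with
      | some j => some (some j)
      | none => arr[k]? := by
  induction ws generalizing arr last with
  | nil => cases last <;> rfl
  | cons q t ih =>
    cases last with
    | none =>
      show ((t.foldl pvLinkStep (arr, some q)).1)[k]? = _
      rw [ih arr (some q) (fun p hp => hws p (by simp [hp]))
        (fun lw hlw => by cases hlw; exact hws q (by simp)) (by simpa using hnd)]
      rfl
    | some lw =>
      have hlw := hlast lw rfl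
      have hnd' : ([q.1] ++ t.map Prod.fst).Nodup := by
        simp only [List.nodup_cons, List.map_cons, List.singleton_append] at hnd ⊢
        tauto
      have hlen : (PySem.List.pySetD arr lw.1 (some q.1)).length = arr.length :=
        PySem.List.length_pySetD ..
      show ((t.foldl pvLinkStep (PySem.List.pySetD arr lw.1 (some q.1), some q)).1)[k]? = _
      rw [ih (PySem.List.pySetD arr lw.1 (some q.1)) (some q)
        (fun p hp => by rw [hlen]; exact hws p (by simp [hp]))
        (fun lw' hlw' => by cases hlw'; rw [hlen]; exact hws q (by simp)) (by simpa using hnd')]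
      by_cases hlk : lw.1 = (k : Int)
      · have ht : succF (some q) t (k : Int) = none := by
          cases h' : succF (some q) t (k : Int) with
          | none => rfl
          | some j =>
            exfalso
            have hmem : lw.1 ∈ q.1 :: t.map Prod.fst := by
              rcases succF_mem h' with h1 | h2
              · rw [hlk, h1]; exact List.mem_cons_self
              · rw [hlk]; exact List.mem_cons_of_mem _ h2
            simp only [List.singleton_append, List.map_cons, List.nodup_cons] at hnd
            exact hnd.1 hmem
        rw [ht]
        show (PySem.List.pySetD arr lw.1 (some q.1))[k]? = _
        rw [hlk, PySem.List.pySetD_natCast]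
        have hk : k < arr.length := by
          have := hlw.2; rw [hlk] at this; exact_mod_cast this
        simp [succF, hlk, hk]
      · cases h' : succF (some q) t (k : Int) with
        | some j => simp [succF, hlk, h']
        | none =>
          simp only [succF, if_neg hlk, h']
          show (PySem.List.pySetD arr lw.1 (some q.1))[k]? = arr[k]?
          rw [PySem.List.pySetD_of_nonneg _ _ hlw.1]
          have : lw.1.toNat ≠ k := by omega
          exact List.getElem?_set_ne this

-- ---- stable sort gives (col, index)-lex order ----

lemma insertBy_lex (x : Int × Int) (ys : List (Int × Int))
    (hys : ys.Pairwise lexP) (hx : ∀ a ∈ ys, a.1 < x.1) :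
    (PySem.List.insertBy (fun a b => decide (get_col a < get_col b)) x ys).Pairwise lexP := by
  induction ys with
  | nil => simp [PySem.List.insertBy]
  | cons y t ih =>
    rw [List.pairwise_cons] at hys
    show (if (decide (get_col x < get_col y)) = true then x :: y :: t
        else y :: PySem.List.insertBy _ x t).Pairwise lexP
    by_cases hxy : get_col x < get_col y
    · rw [if_pos (by simpa using hxy)]
      refine List.pairwise_cons.mpr ⟨?_, List.pairwise_cons.mpr ⟨hys.1, hys.2⟩⟩
      intro z hz
      rcases List.mem_cons.mp hz with rfl | hz'
      · exact Or.inl hxy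
      · rcases hys.1 z hz' with h1 | h2
        · exact Or.inl (lt_trans hxy h1)
        · exact Or.inl (by simp only [get_col] at hxy; omega)
    · rw [if_neg (by simpa using hxy)]
      refine List.pairwise_cons.mpr ⟨?_, ih hys.2 (fun a ha => hx a (List.mem_cons_of_mem _ ha))⟩
      intro z hz
      rcases (PySem.List.mem_insertBy _ _ _ _).mp hz with rfl | hz'
      · simp only [get_col, not_lt] at hxy
        rcases lt_or_eq_of_le hxy with h1 | h1
        · exact Or.inl h1
        · exact Or.inr ⟨h1, hx y List.mem_cons_self⟩
      · exact hys.1 z hz'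

lemma sorted_lexP (xs : List (Int × Int)) (h : xs.Pairwise (fun a b => a.1 < b.1)) :
    (PySem.List.sorted xs get_col).Pairwise lexP := by
  rw [PySem.List.sorted_eq_foldl_insertBy]
  induction xs using List.reverseRecOn with
  | nil => simp
  | append_singleton t x ih =>
    rw [List.pairwise_append] at h
    rw [List.foldl_append, List.foldl_cons, List.foldl_nil]
    apply insertBy_lex
    · exact ih h.1
    · intro a ha
      rw [← PySem.List.sorted_eq_foldl_insertBy t get_col, PySem.List.mem_sorted] at ha
      exact h.2.2 a ha x (by simp)

-- ---- the successor in a lex-sorted list is the least strictly greater candidate ----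

lemma succF_shift (q : Int × Int) (ws : List (Int × Int)) (k : Int) (hq : q.1 ≠ k) :
    succF (some q) ws k = succF none ws k := by
  cases ws with
  | nil => rfl
  | cons a t => simp [succF, hq]

lemma succF_spec (ws : List (Int × Int)) (k c : Int)
    (hpw : ws.Pairwise lexP) (hmem : (k, c) ∈ ws) (hnd : (ws.map Prod.fst).Nodup) :
    (succF none ws k = none → ∀ q ∈ ws, ¬ pvLexLt (c, k) (q.2, q.1) = true) ∧
    (∀ j, succF none ws k = some j → ∃ c', (j, c') ∈ ws ∧ pvLexLt (c, k) (c', j) = true ∧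
        (∀ q ∈ ws, pvLexLt (c, k) (q.2, q.1) = true → ¬ pvLexLt (q.2, q.1) (c', j) = true)) := by
  induction ws with
  | nil => simp at hmem
  | cons q t ih =>
    rw [List.pairwise_cons] at hpw
    rw [List.map_cons, List.nodup_cons] at hnd
    by_cases hqk : q = (k, c)
    · subst hqk
      cases t with
      | nil =>
        refine ⟨fun _ q' hq' => ?_, fun j hj => by simp [succF] at hj⟩
        rcases List.mem_singleton.mp hq' with rfl
        simp [pvLexLt_iff]
      | cons z t' =>
        have hz : succF none ((k, c) :: z :: t') k = some z.1 := by
          show (if (k, c).1 = k then some z.1 else _) = some z.1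
          simp
        refine ⟨fun h0 => by rw [hz] at h0; exact absurd h0 (by simp), fun j hj => ?_⟩
        rw [hz] at hj
        cases hj
        have hlez : lexP (k, c) z := hpw.1 z List.mem_cons_self
        refine ⟨z.2, List.mem_cons_of_mem _ List.mem_cons_self, ?_, ?_⟩
        · rw [pvLexLt_iff]; rcases hlez with h1 | h1
          · exact Or.inl h1
          · exact Or.inr ⟨h1.1, h1.2⟩
        · intro q' hq' hgt hlt
          rcases List.mem_cons.mp hq' with rfl | hq2
          · rw [pvLexLt_iff] at hgt hlt; omega
          · rcases List.mem_cons.mp hq2 with rfl | hq3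
            · rw [pvLexLt_iff] at hlt; omega
            · have := List.pairwise_cons.mp hpw.2
              rcases this.1 q' hq3 with h1 | h1 <;>
                (rw [pvLexLt_iff] at hlt; simp only [lexP] at *; omega)
    · have hmem' : (k, c) ∈ t := by
        rcases List.mem_cons.mp hmem with h | h
        · exact absurd h.symm hqk
        · exact h
      have hq1 : q.1 ≠ k := by
        intro he
        exact hnd.1 (he ▸ (List.mem_map.mpr ⟨(k, c), hmem', rfl⟩))
      have hshift : succF none (q :: t) k = succF none t k := by
        show succF (some q) t k = _
        exact succF_shift q t k hq1
      have hnotgt : ¬ pvLexLt (c, k) (q.2, q.1) = true := by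
        rcases hpw.1 (k, c) hmem' with h1 | h1 <;> (rw [pvLexLt_iff]; simp only at h1 ⊢; omega)
      obtain ⟨ih1, ih2⟩ := ih hpw.2 hmem' hnd.2
      constructor
      · intro h0 q' hq'
        rw [hshift] at h0
        rcases List.mem_cons.mp hq' with rfl | hq2
        · exact hnotgt
        · exact ih1 h0 q' hq2
      · intro j hj
        rw [hshift] at hj
        obtain ⟨c', hc1, hc2, hc3⟩ := ih2 j hj
        refine ⟨c', List.mem_cons_of_mem _ hc1, hc2, ?_⟩
        intro q' hq' hgt
        rcases List.mem_cons.mp hq' with rfl | hq2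
        · exact absurd hgt hnotgt
        · exact hc3 q' hq2 hgt

lemma succF_none_of_not_mem (ws : List (Int × Int)) (k : Int) (h : k ∉ ws.map Prod.fst) :
    succF none ws k = none := by
  cases ws with
  | nil => rfl
  | cons q t =>
    show succF (some q) t k = none
    cases h' : succF (some q) t k with
    | none => rfl
    | some j =>
      rcases succF_mem h' with h1 | h2
      · exact absurd (by simp [← h1]) h
      · exact absurd (by simp [List.mem_map] at h2 ⊢; tauto) h

-- ---- B's inner fold computes the least candidate ----

lemma pvLexLt_trans {a b c : Int × Int} (h1 : pvLexLt a b = true) (h2 : pvLexLt b c = true) :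
    pvLexLt a c = true := by
  rw [pvLexLt_iff] at *; omega

lemma pvBestStep_none (p q : Int × (Int × Int)) :
    pvBestStep p none q = if (q.2.1 == p.2.1 && pvLexLt (p.2.2, p.1) (q.2.2, q.1)) = true
      then some (q.2.2, q.1) else none := by
  simp [pvBestStep]

lemma pvBestStep_some (p q : Int × (Int × Int)) (b0 : Int × Int) :
    pvBestStep p (some b0) q =
      if (q.2.1 == p.2.1 && pvLexLt (p.2.2, p.1) (q.2.2, q.1) && pvLexLt (q.2.2, q.1) b0) = true
      then some (q.2.2, q.1) else some b0 := by
  simp [pvBestStep]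

lemma bestFold_spec (e : List (Int × (Int × Int))) (p : Int × (Int × Int)) :
    (e.foldl (pvBestStep p) none = none →
      ∀ q ∈ e, ¬ (q.2.1 = p.2.1 ∧ pvLexLt (p.2.2, p.1) (q.2.2, q.1) = true)) ∧
    (∀ b, e.foldl (pvBestStep p) none = some b →
      (∃ q ∈ e, q.2.1 = p.2.1 ∧ pvLexLt (p.2.2, p.1) (q.2.2, q.1) = true ∧ b = (q.2.2, q.1)) ∧
      (∀ q' ∈ e, q'.2.1 = p.2.1 → pvLexLt (p.2.2, p.1) (q'.2.2, q'.1) = true →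
        ¬ pvLexLt (q'.2.2, q'.1) b = true)) := by
  induction e using List.reverseRecOn with
  | nil => exact ⟨fun _ q hq => by simp at hq, fun b hb => by simp at hb⟩
  | append_singleton t q ih =>
    rw [List.foldl_append, List.foldl_cons, List.foldl_nil]
    obtain ⟨ih1, ih2⟩ := ih
    cases hf : t.foldl (pvBestStep p) none with
    | none =>
      rw [pvBestStep_none]
      by_cases hc : q.2.1 = p.2.1 ∧ pvLexLt (p.2.2, p.1) (q.2.2, q.1) = true
      · rw [if_pos (by simp [hc.1, hc.2])]
        refine ⟨fun h0 => absurd h0 (by simp), fun b hb => ?_⟩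
        cases hb
        refine ⟨⟨q, by simp, hc.1, hc.2, rfl⟩, ?_⟩
        intro q' hq' hr hgt hlt
        rcases List.mem_append.mp hq' with hq2 | hq2
        · exact ih1 hf q' hq2 ⟨hr, hgt⟩
        · rcases List.mem_singleton.mp hq2 with rfl
          rw [pvLexLt_iff] at hlt; omega
      · rw [if_neg (by intro h; exact hc (by simpa using h))]
        refine ⟨fun _ q' hq' h => ?_, fun b hb => by simp at hb⟩
        rcases List.mem_append.mp hq' with hq2 | hq2
        · exact ih1 hf q' hq2 h
        · rcases List.mem_singleton.mp hq2 with rfl; exact hc h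
    | some b0 =>
      rw [pvBestStep_some]
      by_cases hc : q.2.1 = p.2.1 ∧ pvLexLt (p.2.2, p.1) (q.2.2, q.1) = true ∧
          pvLexLt (q.2.2, q.1) b0 = true
      · rw [if_pos (by simp [hc.1, hc.2.1, hc.2.2])]
        refine ⟨fun h0 => absurd h0 (by simp), fun b hb => ?_⟩
        cases hb
        refine ⟨⟨q, by simp, hc.1, hc.2.1, rfl⟩, ?_⟩
        intro q' hq' hr hgt hlt
        rcases List.mem_append.mp hq' with hq2 | hq2
        · exact (ih2 b0 hf).2 q' hq2 hr hgt (pvLexLt_trans hlt hc.2.2)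
        · rcases List.mem_singleton.mp hq2 with rfl
          rw [pvLexLt_iff] at hlt; omega
      · rw [if_neg (by intro h; exact hc (by simpa [and_assoc] using h))]
        refine ⟨fun h0 => absurd h0 (by simp), fun b hb => ?_⟩
        cases hb
        obtain ⟨⟨qw, hqw1, hqw2, hqw3, hqw4⟩, hmin⟩ := ih2 b0 hf
        refine ⟨⟨qw, List.mem_append_left _ hqw1, hqw2, hqw3, hqw4⟩, ?_⟩
        intro q' hq' hr hgt
        rcases List.mem_append.mp hq' with hq2 | hq2
        · exact hmin q' hq2 hr hgt
        · rcases List.mem_singleton.mp hq2 with rfl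
          intro hlt
          exact hc ⟨hr, hgt, hlt⟩

-- ---- assembling ----

lemma foldl_append_singleton {α β : Type} (f : α → β) (l : List α) (acc : List β) :
    l.foldl (fun res p => res ++ [f p]) acc = acc ++ l.map f := by
  induction l generalizing acc with
  | nil => simp
  | cons x t ih => simp [List.foldl_cons, ih]

lemma mem_rowPairs (coords : List (Int × Int)) (r j c : Int) :
    (j, c) ∈ rowPairs coords r ↔ (j, (r, c)) ∈ PySem.List.enumerate coords 0 := by
  simp only [rowPairs, List.mem_map, List.mem_filter]
  constructor
  · rintro ⟨⟨j', r', c'⟩, ⟨hq, hr⟩, he⟩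
    simp only [beq_iff_eq] at hr
    cases he
    simpa [hr] using hq
  · intro h
    exact ⟨(j, (r, c)), ⟨h, by simp⟩, rfl⟩

lemma rowPairs_pairwise (coords : List (Int × Int)) (r : Int) :
    (rowPairs coords r).Pairwise (fun a b => a.1 < b.1) := by
  unfold rowPairs
  rw [List.pairwise_map]
  exact (PySem.List.pairwise_lt_enumerate coords 0).filter _

lemma ws_row {coords : List (Int × Int)} {r : Int} {p : Int × Int}
    (hp : p ∈ PySem.List.sorted (rowPairs coords r) get_col) :
    ∃ (m : Nat) (hm : m < coords.length),
      p.1 = (m : Int) ∧ (coords[m]'hm).1 = r ∧ p.2 = (coords[m]'hm).2 := by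
  rw [PySem.List.mem_sorted] at hp
  obtain ⟨j, c⟩ := p
  rw [mem_rowPairs] at hp
  rcases (PySem.List.mem_enumerate_iff ..).mp hp with ⟨m, hm, he⟩
  simp only [Prod.mk.injEq] at he
  obtain ⟨he1, he2⟩ := he
  exact ⟨m, hm, by omega, by rw [← he2], by rw [← he2]⟩

lemma ws_bounds (coords : List (Int × Int)) (r : Int) :
    ∀ p ∈ PySem.List.sorted (rowPairs coords r) get_col,
      0 ≤ p.1 ∧ p.1 < (coords.length : Int) := by
  intro p hp
  obtain ⟨m, hm, h1, -, -⟩ := ws_row hp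
  omega

lemma ws_nodup (coords : List (Int × Int)) (r : Int) :
    ((PySem.List.sorted (rowPairs coords r) get_col).map Prod.fst).Nodup := by
  have hperm : (PySem.List.sorted (rowPairs coords r) get_col).Perm (rowPairs coords r) :=
    PySem.List.sorted_perm ..
  have h2 : ((rowPairs coords r).map Prod.fst).Nodup :=
    ((List.pairwise_map).mpr (rowPairs_pairwise coords r)).imp (fun h => ne_of_lt h)
  exact ((hperm.map Prod.fst).nodup_iff).mpr h2

lemma mem_ws_self (coords : List (Int × Int)) (k : Nat) (hk : k < coords.length) :
    ((k : Int), coords[k].2) ∈ PySem.List.sorted (rowPairs coords coords[k].1) get_col := by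
  rw [PySem.List.mem_sorted, mem_rowPairs]
  exact (PySem.List.mem_enumerate_iff ..).mpr ⟨k, hk, by simp⟩

lemma not_mem_ws (coords : List (Int × Int)) (k : Nat) (hk : k < coords.length) {r : Int}
    (hr : r ≠ coords[k].1) :
    (k : Int) ∉ (PySem.List.sorted (rowPairs coords r) get_col).map Prod.fst := by
  intro h
  obtain ⟨p, hp, hpk⟩ := List.mem_map.mp h
  obtain ⟨m, hm, h1, h2, -⟩ := ws_row hp
  have hmk : m = k := by omega
  subst hmk
  exact hr h2.symm

lemma length_rowsFold (coords : List (Int × Int)) (rs : List Int) (arr : List (Option Int)) :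
    (rs.foldl (fun a r =>
      ((PySem.List.sorted (rowPairs coords r) get_col).foldl pvLinkStep (a, none)).1) arr).length
      = arr.length := by
  induction rs generalizing arr with
  | nil => rfl
  | cons r t ih => rw [List.foldl_cons, ih, length_linkFold]

lemma rowsFold_get (coords : List (Int × Int)) (k : Nat) (hk : k < coords.length)
    (rs : List Int) (arr : List (Option Int)) (v : Option Int)
    (hlen : arr.length = coords.length) (harr : arr[k]? = some v) :
    (rs.foldl (fun a r =>
      ((PySem.List.sorted (rowPairs coords r) get_col).foldl pvLinkStep (a, none)).1) arr)[k]? =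
    some (if coords[k].1 ∈ rs then
      (match succF none (PySem.List.sorted (rowPairs coords coords[k].1) get_col) (k : Int) with
        | some j => some j | none => v) else v) := by
  induction rs generalizing arr v with
  | nil => simpa using harr
  | cons r t ih =>
    rw [List.foldl_cons]
    have hbnd : ∀ p ∈ PySem.List.sorted (rowPairs coords r) get_col,
        0 ≤ p.1 ∧ p.1 < (arr.length : Int) := by rw [hlen]; exact ws_bounds coords r
    have hlg := linkFold_get (PySem.List.sorted (rowPairs coords r) get_col) arr none k hbnd
      (by intro lw h; cases h) (by simpa using ws_nodup coords r)
    have hlen' : (((PySem.List.sorted (rowPairs coords r) get_col).foldl pvLinkStep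
        (arr, none)).1).length = coords.length := by rw [length_linkFold, hlen]
    by_cases hr : r = coords[k].1
    · subst hr
      cases hsf : succF none (PySem.List.sorted (rowPairs coords coords[k].1) get_col) (k : Int) with
      | some j =>
        rw [hsf] at hlg
        rw [ih _ _ hlen' hlg]
        by_cases hmem : coords[k].1 ∈ t <;> simp [hmem, hsf]
      | none =>
        rw [hsf, harr] at hlg
        rw [ih _ _ hlen' hlg]
        by_cases hmem : coords[k].1 ∈ t <;> simp [hmem, hsf]
    · rw [succF_none_of_not_mem _ _ (not_mem_ws coords k hk hr), harr] at hlg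
      rw [ih _ _ hlen' hlg]
      have hne : coords[k].1 ≠ r := fun h => hr h.symm
      by_cases hmem : coords[k].1 ∈ t <;> simp [hmem, hne]

lemma core_eq (coords : List (Int × Int)) (k : Nat) (hk : k < coords.length) :
    (match succF none (PySem.List.sorted (rowPairs coords coords[k].1) get_col) (k : Int) with
      | some j => some j | none => (none : Option Int)) =
    (match (PySem.List.enumerate coords 0).foldl (pvBestStep ((k : Int), coords[k])) none with
      | none => none | some b => some b.2) := by
  obtain ⟨hs1, hs2⟩ := succF_spec (PySem.List.sorted (rowPairs coords coords[k].1) get_col)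
    (k : Int) (coords[k].2)
    (sorted_lexP _ (rowPairs_pairwise coords coords[k].1))
    (mem_ws_self coords k hk) (ws_nodup coords coords[k].1)
  obtain ⟨hb1, hb2⟩ := bestFold_spec (PySem.List.enumerate coords 0) ((k : Int), coords[k])
  cases hsf : succF none (PySem.List.sorted (rowPairs coords coords[k].1) get_col) (k : Int) with
  | none =>
    cases hbf : (PySem.List.enumerate coords 0).foldl (pvBestStep ((k : Int), coords[k])) none with
    | none => rfl
    | some b =>
      exfalso
      obtain ⟨⟨q, hq, hqr, hqgt, rfl⟩, -⟩ := hb2 b hbf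
      obtain ⟨q1, q2, q3⟩ := q
      simp only at hqr hqgt
      have hmem : (q1, q3) ∈ PySem.List.sorted (rowPairs coords coords[k].1) get_col := by
        rw [PySem.List.mem_sorted, mem_rowPairs]
        rw [show ((k : Int), coords[k]).2.1 = coords[k].1 from rfl] at hqr
        rw [← hqr]
        exact hq
      exact hs1 hsf (q1, q3) hmem hqgt
  | some j =>
    obtain ⟨c', hc1, hc2, hc3⟩ := hs2 j hsf
    have hqa : (j, (coords[k].1, c')) ∈ PySem.List.enumerate coords 0 :=
      (mem_rowPairs ..).mp ((PySem.List.mem_sorted ..).mp hc1)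
    cases hbf : (PySem.List.enumerate coords 0).foldl (pvBestStep ((k : Int), coords[k])) none with
    | none =>
      exact absurd ⟨rfl, hc2⟩ (hb1 hbf (j, (coords[k].1, c')) hqa)
    | some b =>
      obtain ⟨⟨q, hq, hqr, hqgt, rfl⟩, hmin⟩ := hb2 b hbf
      obtain ⟨q1, q2, q3⟩ := q
      simp only at hqr hqgt hmin ⊢
      have h1 : ¬ pvLexLt (c', j) (q3, q1) = true := hmin (j, (coords[k].1, c')) hqa rfl hc2
      have h2 : ¬ pvLexLt (q3, q1) (c', j) = true := by
        apply hc3 (q1, q3)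
        · rw [PySem.List.mem_sorted, mem_rowPairs]
          rw [show ((k : Int), coords[k]).2.1 = coords[k].1 from rfl] at hqr
          rw [← hqr]
          exact hq
        · exact hqgt
      have : j = q1 := by rw [pvLexLt_iff] at h1 h2; omega
      rw [this]

theorem map_rights_eq (coords : List (Int × Int)) : map_rights coords = map_rights_alt coords := by
  have hB : map_rights_alt coords = (PySem.List.enumerate coords 0).map
      (fun p => match (PySem.List.enumerate coords 0).foldl (pvBestStep p) none with
        | none => none | some b => some b.2) := by
    show List.foldl (fun res p => res ++ [(fun (p : Int × (Int × Int)) =>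
        match (PySem.List.enumerate coords 0).foldl (pvBestStep p) none with
        | none => none | some b => some b.2) p]) [] (PySem.List.enumerate coords 0) = _
    rw [foldl_append_singleton]
    rfl
  have hA : map_rights coords = (PySem.List.dedup (coords.map Prod.fst)).foldl
      (fun a r => ((PySem.List.sorted (rowPairs coords r) get_col).foldl pvLinkStep (a, none)).1)
      (List.replicate coords.length none) := by
    show ((PySem.List.enumerate coords 0).foldl pvGroupStep PySem.Dict.empty).items.foldl
      pvRowStep (List.replicate coords.length none) = _
    rw [groupStep_items, List.foldl_map]
    rfl
  apply List.ext_getElem?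
  intro k
  by_cases hk : k < coords.length
  · rw [hA, hB]
    rw [rowsFold_get coords k hk _ _ none (by simp) (by simp [hk])]
    have hkmem : coords[k].1 ∈ PySem.List.dedup (coords.map Prod.fst) := by
      rw [PySem.List.mem_dedup]
      exact List.mem_map.mpr ⟨coords[k], List.getElem_mem _, rfl⟩
    rw [if_pos hkmem]
    have he : (PySem.List.enumerate coords 0)[k]? = some ((k : Int), coords[k]) := by
      rw [PySem.List.getElem?_enumerate]
      simp [List.getElem?_eq_getElem hk]
    rw [List.getElem?_map, he, Option.map_some]
    congr 1
    exact core_eq coords k hk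
  · rw [List.getElem?_eq_none, List.getElem?_eq_none]
    · rw [hB, List.length_map, PySem.List.length_enumerate]; omega
    · rw [hA, length_rowsFold, List.length_replicate]; omega

-- ===== VERDICT (by name: the statement is the Claim_ definition above) =====
theorem map_rights_spec : Claim_equal_map_rights := by
  intro coords _
  unfold Spec_map_rights
  exact map_rights_eq coords
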